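-- pv_equiv track=rewrite | github.com/KaifAsALearner/HMES | doctor/views.py | tuple_formatting
-- ===== SOURCE A (Python) =====
-- from collections import OrderedDict
--
-- def tuple_formatting(tuple_list):
--     result={}
--     for key,value in tuple_list:
--         if key not in result:
--             result[key]=[]
--         result[key].append(value)
--
--     # Desired order of days and times
--     day_order = ['MONDAY', 'TUESDAY', 'WEDNESDAY', 'THURSDAY', 'FRIDAY', 'SATURDAY', 'SUNDAY']
--     time_order = {'MORNING': 1, 'AFTERNOON': 2, 'EVENING': 3}
--
--     # Arrange the dictionary according to the specified order
--     sorted_availability = OrderedDict(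
--         (day, sorted(result[day], key=lambda time: time_order[time]))
--         for day in day_order if day in result
--     )
--
--     return sorted_availability
-- ===== SOURCE B (Python) =====
-- from collections import OrderedDict
--
-- def tuple_formatting(tuple_list):
--     # One pass per fixed day: bucket each matching time into its slot
--     # (counting sort over the three time slots) -- no grouping dict, no sorted().
--     out = OrderedDict()
--     for day in ('MONDAY', 'TUESDAY', 'WEDNESDAY', 'THURSDAY', 'FRIDAY',
--                 'SATURDAY', 'SUNDAY'):
--         morning, afternoon, evening = [], [], []
--         for key, value in tuple_list:
--             if key == day:
--                 if value == 'MORNING':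
--                     morning.append(value)
--                 elif value == 'AFTERNOON':
--                     afternoon.append(value)
--                 else:
--                     evening.append(value)
--         if morning or afternoon or evening:
--             out[day] = morning + afternoon + evening
--     return out
-- ===== Notes on version B (the rewrite author's own statement) =====
-- stated objective: alternative
-- what changed: Drops the grouping dict and per-day sorted(): B iterates the fixed seven-day order and, per day, buckets each matching time into morning/afternoon/evening slots in one scan and concatenates them (a three-way counting sort), so no dict and no comparison sort are used.
import Mathlib
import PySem

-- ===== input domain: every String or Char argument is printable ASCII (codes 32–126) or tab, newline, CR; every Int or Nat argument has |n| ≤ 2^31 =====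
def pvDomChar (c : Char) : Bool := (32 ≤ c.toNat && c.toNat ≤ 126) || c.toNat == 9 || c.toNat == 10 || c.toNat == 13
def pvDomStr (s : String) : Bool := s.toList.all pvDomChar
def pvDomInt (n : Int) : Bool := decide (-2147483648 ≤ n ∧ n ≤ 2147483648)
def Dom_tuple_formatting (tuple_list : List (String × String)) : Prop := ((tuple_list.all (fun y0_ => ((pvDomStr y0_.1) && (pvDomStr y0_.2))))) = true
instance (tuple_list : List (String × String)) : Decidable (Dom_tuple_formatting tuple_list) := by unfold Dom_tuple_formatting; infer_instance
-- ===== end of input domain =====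

-- B replaces A's grouping dict + per-day sorted() by a fixed seven-day scan with three
-- time buckets (a three-way counting sort); a different algorithm of similar cost.

-- ===== PORT A =====
def tuple_formatting (tuple_list : List (String × String)) : List (String × List String) :=
  -- result = {}; for key, value in tuple_list: if key not in result: result[key] = []; result[key].append(value)
  let result : PySem.Dict String (List String) :=
    tuple_list.foldl
      (fun d p =>
        (if d.contains p.1 then d else d.insert p.1 ([] : List String)).modify p.1 []
          (fun v => v ++ [p.2]))
      PySem.Dict.empty
  let day_order : List String :=
    ["MONDAY", "TUESDAY", "WEDNESDAY", "THURSDAY", "FRIDAY", "SATURDAY", "SUNDAY"]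
  let time_order : PySem.Dict String Int :=
    PySem.Dict.ofList [("MORNING", 1), ("AFTERNOON", 2), ("EVENING", 3)]
  -- OrderedDict((day, sorted(result[day], key=lambda time: time_order[time])) for day in day_order if day in result)
  -- time_order[time] raises KeyError on an unknown time; Pre_ excludes exactly those
  -- inputs, so the `.getD t 0` total form never takes its default branch on admitted inputs.
  day_order.foldl
    (fun acc day =>
      if result.contains day then
        acc ++ [(day, PySem.List.sorted (result.getD day []) (fun t => time_order.getD t 0) false)]
      else acc)
    []

-- ===== PORT B =====
def tuple_formatting_alt (tuple_list : List (String × String)) : List (String × List String) :=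
  (["MONDAY", "TUESDAY", "WEDNESDAY", "THURSDAY", "FRIDAY", "SATURDAY", "SUNDAY"] : List String).foldl
    (fun out day =>
      -- one scan of tuple_list: bucket each matching time into its slot
      let b : List String × List String × List String :=
        tuple_list.foldl
          (fun s p =>
            if p.1 == day then
              if p.2 == "MORNING" then (s.1 ++ [p.2], s.2.1, s.2.2)
              else if p.2 == "AFTERNOON" then (s.1, s.2.1 ++ [p.2], s.2.2)
              else (s.1, s.2.1, s.2.2 ++ [p.2])
            else s)
          ([], [], [])
      if !b.1.isEmpty || !b.2.1.isEmpty || !b.2.2.isEmpty then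
        out ++ [(day, b.1 ++ b.2.1 ++ b.2.2)]
      else out)
    []

-- ===== PRECONDITION & SPEC =====
-- Pre_ excludes exactly the inputs on which A raises KeyError: a pair whose key is one of
-- the seven day names but whose value is not MORNING/AFTERNOON/EVENING.
def Pre_tuple_formatting (tuple_list : List (String × String)) : Prop :=
  ∀ p ∈ tuple_list,
    p.1 ∈ (["MONDAY", "TUESDAY", "WEDNESDAY", "THURSDAY", "FRIDAY", "SATURDAY", "SUNDAY"] : List String) →
    p.2 ∈ (["MORNING", "AFTERNOON", "EVENING"] : List String)
instance (tuple_list : List (String × String)) : Decidable (Pre_tuple_formatting tuple_list) := by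
  unfold Pre_tuple_formatting; infer_instance

def pvWitness_tuple_formatting : (List (String × String)) :=
  [("MONDAY", "EVENING"), ("MONDAY", "MORNING"), ("XDAY", "NOON")]

def Spec_tuple_formatting (tuple_list : List (String × String)) (out : List (String × List String)) : Prop := out = tuple_formatting_alt tuple_list
instance (tuple_list : List (String × String)) (out : List (String × List String)) : Decidable (Spec_tuple_formatting tuple_list out) := by unfold Spec_tuple_formatting; infer_instance

-- ===== CLAIM (what is proved, stated in full; the proofs are below) =====
def Claim_equal_tuple_formatting : Prop := ∀ (tuple_list : List (String × String)), Dom_tuple_formatting tuple_list → Pre_tuple_formatting tuple_list → Spec_tuple_formatting tuple_list (tuple_formatting tuple_list)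

-- ===== LEMMAS AND PROOFS =====

-- the grouping loop of A: lookup after the loop = that key's values in input order
lemma pv_groupA_getD (l : List (String × String)) (c : String) :
    ∀ d : PySem.Dict String (List String),
      (l.foldl
        (fun d p =>
          (if d.contains p.1 then d else d.insert p.1 ([] : List String)).modify p.1 []
            (fun v => v ++ [p.2])) d).getD c []
      = d.getD c [] ++ (l.filter (fun p => p.1 == c)).map (·.2) := by
  induction l with
  | nil => intro d; simp
  | cons p t ih =>
    intro d
    simp only [List.foldl_cons, ih, List.filter_cons]
    by_cases hc : p.1 = c
    · subst hc
      by_cases hcont : d.contains p.1 = true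
      · simp [hcont, PySem.Dict.getD_modify]
      · have hc2 : d.contains p.1 = false := by
          cases hb : d.contains p.1
          · rfl
          · exact absurd hb hcont
        simp [hcont, PySem.Dict.getD_modify, PySem.Dict.getD_insert,
          PySem.Dict.getD_of_not_contains d ([] : List String) hc2]
    · have hbc : (p.1 == c) = false := by simp [hc]
      have hcc : ¬c = p.1 := fun h => hc h.symm
      by_cases hcont : d.contains p.1 = true <;>
        simp [hcont, hbc, hcc, PySem.Dict.getD_modify, PySem.Dict.getD_insert]

-- the grouping loop of A: membership after the loop
lemma pv_groupA_contains (l : List (String × String)) (c : String) :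
    ∀ d : PySem.Dict String (List String),
      (l.foldl
        (fun d p =>
          (if d.contains p.1 then d else d.insert p.1 ([] : List String)).modify p.1 []
            (fun v => v ++ [p.2])) d).contains c
      = (d.contains c || l.any (fun p => p.1 == c)) := by
  induction l with
  | nil => intro d; simp
  | cons p t ih =>
    intro d
    simp only [List.foldl_cons, ih, List.any_cons]
    have hstep : ((if d.contains p.1 then d else d.insert p.1 ([] : List String)).modify p.1 []
        (fun v => v ++ [p.2])).contains c = (c == p.1 || d.contains c) := by
      by_cases hcont : d.contains p.1 = true <;>
        cases hc : (c == p.1) <;>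
          simp [hcont, hc, PySem.Dict.contains_modify, PySem.Dict.contains_insert]
    have hbc : (c == p.1) = (p.1 == c) := by
      cases hb : (p.1 == c)
      · simp [Ne.symm (beq_eq_false_iff_ne.mp hb)]
      · simp [eq_of_beq hb]
    rw [hstep, hbc, Bool.or_assoc, Bool.or_left_comm]

-- B's bucket loop, in closed form
lemma pv_bucketsB (day : String) (l : List (String × String)) :
    ∀ s : List String × List String × List String,
      l.foldl
        (fun s p =>
          if p.1 == day then
            if p.2 == "MORNING" then (s.1 ++ [p.2], s.2.1, s.2.2)
            else if p.2 == "AFTERNOON" then (s.1, s.2.1 ++ [p.2], s.2.2)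
            else (s.1, s.2.1, s.2.2 ++ [p.2])
          else s) s
      = (s.1 ++ (l.filter (fun p => p.1 == day && p.2 == "MORNING")).map (·.2),
         s.2.1 ++ (l.filter (fun p => p.1 == day && (!(p.2 == "MORNING") && p.2 == "AFTERNOON"))).map (·.2),
         s.2.2 ++ (l.filter (fun p => p.1 == day && (!(p.2 == "MORNING") && !(p.2 == "AFTERNOON")))).map (·.2)) := by
  induction l with
  | nil => intro s; simp
  | cons p t ih =>
    intro s
    simp only [List.foldl_cons, List.filter_cons]
    rw [ih]
    by_cases h1 : p.1 = day
    · by_cases hM : p.2 = "MORNING"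
      · simp [h1, hM]
      · by_cases hA : p.2 = "AFTERNOON" <;> simp [h1, hM, hA]
    · simp [h1]

-- insertBy walks past a prefix it does not insert into
lemma pv_insertBy_skip {α : Type} (before : α → α → Bool) (x : α) :
    ∀ (ys zs : List α), (∀ y ∈ ys, before x y = false) →
      PySem.List.insertBy before x (ys ++ zs) = ys ++ PySem.List.insertBy before x zs := by
  intro ys
  induction ys with
  | nil => intro zs _; simp
  | cons y t ih =>
    intro zs h
    simp only [List.cons_append, PySem.List.insertBy, h y (List.mem_cons_self ..),
      Bool.false_eq_true, if_false]
    simp [ih zs (fun y hy => h y (List.mem_cons_of_mem _ hy))]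

-- insertBy goes in front of a block it precedes everywhere
lemma pv_insertBy_front {α : Type} (before : α → α → Bool) (x : α) :
    ∀ zs : List α, (∀ y ∈ zs, before x y = true) →
      PySem.List.insertBy before x zs = x :: zs := by
  intro zs h
  cases zs with
  | nil => simp [PySem.List.insertBy]
  | cons z t => simp [PySem.List.insertBy, h z (List.mem_cons_self ..)]

-- Python's stable sort by the three-slot key is the concatenation of the three filters
lemma pv_sorted3 (xs : List String)
    (h : ∀ x ∈ xs, x = "MORNING" ∨ x = "AFTERNOON" ∨ x = "EVENING") :
    PySem.List.sorted xs
      (fun t => (PySem.Dict.ofList [("MORNING", (1 : Int)), ("AFTERNOON", 2), ("EVENING", 3)]).getD t 0) false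
    = xs.filter (· == "MORNING") ++ xs.filter (· == "AFTERNOON") ++ xs.filter (· == "EVENING") := by
  induction xs using List.reverseRecOn with
  | nil => simp [PySem.List.sorted]
  | append_singleton xs x ih =>
    have hxs : ∀ y ∈ xs, y = "MORNING" ∨ y = "AFTERNOON" ∨ y = "EVENING" :=
      fun y hy => h y (List.mem_append_left _ hy)
    have hx := h x (List.mem_append_right _ (List.mem_cons_self ..))
    rw [PySem.List.sorted_eq_foldl_insertBy, List.foldl_append,
      ← PySem.List.sorted_eq_foldl_insertBy, ih hxs]
    simp only [List.foldl_cons, List.foldl_nil, List.filter_append]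
    have memM : ∀ y ∈ xs.filter (· == "MORNING"), y = "MORNING" := by
      intro y hy; simpa using (List.mem_filter.mp hy).2
    have memA : ∀ y ∈ xs.filter (· == "AFTERNOON"), y = "AFTERNOON" := by
      intro y hy; simpa using (List.mem_filter.mp hy).2
    have memE : ∀ y ∈ xs.filter (· == "EVENING"), y = "EVENING" := by
      intro y hy; simpa using (List.mem_filter.mp hy).2
    rcases hx with rfl | rfl | rfl
    · -- MORNING: past the MORNING block, in front of AFTERNOON ++ EVENING
      rw [List.append_assoc, pv_insertBy_skip _ _ _ _
          (by intro y hy; rw [memM y hy]; decide),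
        pv_insertBy_front _ _ _
          (by intro y hy
              rcases List.mem_append.mp hy with hy | hy
              · rw [memA y hy]; decide
              · rw [memE y hy]; decide)]
      simp
    · -- AFTERNOON
      rw [List.append_assoc, pv_insertBy_skip _ _ _ _
          (by intro y hy; rw [memM y hy]; decide),
        pv_insertBy_skip _ _ _ _
          (by intro y hy; rw [memA y hy]; decide),
        pv_insertBy_front _ _ _
          (by intro y hy; rw [memE y hy]; decide)]
      simp
    · -- EVENING: after everything
      rw [PySem.List.insertBy_of_forall_not_before _ _ _
          (by intro y hy
              rcases List.mem_append.mp hy with hy | hy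
              · rcases List.mem_append.mp hy with hy | hy
                · rw [memM y hy]; decide
                · rw [memA y hy]; decide
              · rw [memE y hy]; decide)]
      simp

-- a one-slot bucket of the scan = the slot filter of the day's value list
lemma pv_mapFilter (l : List (String × String)) (day v : String) :
    (l.filter (fun p => p.1 == day && p.2 == v)).map (·.2)
    = ((l.filter (fun p => p.1 == day)).map (·.2)).filter (· == v) := by
  rw [List.filter_map, List.filter_filter]
  congr 1
  exact List.filter_congr (by intro p _; simp [Function.comp, Bool.and_comm])

-- ===== VERDICT (by name: the statement is the Claim_ definition above) =====
theorem tuple_formatting_spec : Claim_equal_tuple_formatting := by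
  intro l _ hpre
  unfold Spec_tuple_formatting tuple_formatting tuple_formatting_alt
  dsimp only
  apply PySem.List.foldl_congr_mem
  intro acc day hday
  have hvals : ∀ p ∈ l, p.1 = day →
      p.2 = "MORNING" ∨ p.2 = "AFTERNOON" ∨ p.2 = "EVENING" := by
    intro p hp h1
    have := hpre p hp (by rw [h1]; exact hday)
    simpa using this
  have hF : ∀ x ∈ (l.filter (fun p => p.1 == day)).map (·.2),
      x = "MORNING" ∨ x = "AFTERNOON" ∨ x = "EVENING" := by
    intro x hx
    rcases List.mem_map.mp hx with ⟨p, hp, rfl⟩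
    exact hvals p (List.mem_filter.mp hp).1 (by simpa using (List.mem_filter.mp hp).2)
  -- normalise B's three buckets into slot filters of the day's value list
  have hA : (l.filter (fun p => p.1 == day && (!(p.2 == "MORNING") && p.2 == "AFTERNOON"))).map (·.2)
      = ((l.filter (fun p => p.1 == day)).map (·.2)).filter (· == "AFTERNOON") := by
    rw [← pv_mapFilter]
    congr 1
    apply List.filter_congr
    intro p _
    cases hM : (p.2 == "MORNING")
    · simp [hM]
    · have hA2 : (p.2 == "AFTERNOON") = false := by
        rw [eq_of_beq hM]; decide
      simp [hM, hA2]
  have hE : (l.filter (fun p => p.1 == day && (!(p.2 == "MORNING") && !(p.2 == "AFTERNOON")))).map (·.2)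
      = ((l.filter (fun p => p.1 == day)).map (·.2)).filter (· == "EVENING") := by
    rw [← pv_mapFilter]
    congr 1
    apply List.filter_congr
    intro p hp
    by_cases h1 : p.1 = day
    · rcases hvals p hp h1 with h2 | h2 | h2 <;> simp [h1, h2]
    · have hb : (p.1 == day) = false := by simp [h1]
      simp [hb]
  simp only [pv_groupA_contains, pv_groupA_getD, pv_bucketsB, PySem.Dict.contains_empty,
    PySem.Dict.getD_empty, Bool.false_or, List.nil_append, pv_mapFilter, hA, hE,
    pv_sorted3 _ hF]
  -- both inclusion tests agree: the day occurs in l iff some bucket is non-empty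
  have hperm : (((l.filter (fun p => p.1 == day)).map (·.2)).filter (· == "MORNING")
      ++ ((l.filter (fun p => p.1 == day)).map (·.2)).filter (· == "AFTERNOON")
      ++ ((l.filter (fun p => p.1 == day)).map (·.2)).filter (· == "EVENING")).Perm
      ((l.filter (fun p => p.1 == day)).map (·.2)) := by
    rw [← pv_sorted3 _ hF]
    exact PySem.List.sorted_perm _ _ _
  cases hany : l.any (fun p => p.1 == day) with
  | false =>
    have hnil : l.filter (fun p => p.1 == day) = [] := by
      rw [List.filter_eq_nil_iff]
      intro p hp h
      have hT : l.any (fun p => p.1 == day) = true := List.any_eq_true.mpr ⟨p, hp, h⟩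
      rw [hany] at hT
      exact Bool.false_ne_true hT
    simp [hnil]
  | true =>
    have hne : (((l.filter (fun p => p.1 == day)).map (·.2)).filter (· == "MORNING")
        ++ ((l.filter (fun p => p.1 == day)).map (·.2)).filter (· == "AFTERNOON")
        ++ ((l.filter (fun p => p.1 == day)).map (·.2)).filter (· == "EVENING")) ≠ [] := by
      intro hnil
      have hFnil : ((l.filter (fun p => p.1 == day)).map (·.2)) = [] :=
        List.Perm.eq_nil ((hnil ▸ hperm).symm)
      rcases List.any_eq_true.mp hany with ⟨p, hp, hpd⟩
      have : p ∈ l.filter (fun p => p.1 == day) := List.mem_filter.mpr ⟨hp, hpd⟩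
      simp [List.map_eq_nil_iff.mp hFnil] at this
    cases h1 : (((l.filter (fun p => p.1 == day)).map (·.2)).filter (· == "MORNING")).isEmpty <;>
      cases h2 : (((l.filter (fun p => p.1 == day)).map (·.2)).filter (· == "AFTERNOON")).isEmpty <;>
      cases h3 : (((l.filter (fun p => p.1 == day)).map (·.2)).filter (· == "EVENING")).isEmpty <;>
      simp_all [List.isEmpty_iff]
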